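-- pv_equiv track=rewrite | github.com/AdamZhouSE/pythonHomework | Code/CodeRecords/2969/60791/297993.py | isLy
-- ===== SOURCE A (Python) =====
-- def isLy(s):
-- 	token = []
-- 	for i in range(len(s)):
-- 		token.append(s[i:])
-- 	token = sorted(token)
-- 	if token[0] == s:
-- 		return True
-- 	return False
-- ===== SOURCE B (Python) =====
-- def isLy(s):
-- 	return all(s <= s[i:] for i in range(1, len(s)))
-- ===== Notes on version B (the rewrite author's own statement) =====
-- stated objective: faster
-- what changed: B drops A's build-all-suffixes-then-sort pass entirely and instead checks in one short-circuiting scan that s <= s[i:] for every i, which is exactly 's equals the head of the sorted suffix list'.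
-- outside the precondition, e.g. on isLy(''): A raises IndexError, B returns True
import Mathlib
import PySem

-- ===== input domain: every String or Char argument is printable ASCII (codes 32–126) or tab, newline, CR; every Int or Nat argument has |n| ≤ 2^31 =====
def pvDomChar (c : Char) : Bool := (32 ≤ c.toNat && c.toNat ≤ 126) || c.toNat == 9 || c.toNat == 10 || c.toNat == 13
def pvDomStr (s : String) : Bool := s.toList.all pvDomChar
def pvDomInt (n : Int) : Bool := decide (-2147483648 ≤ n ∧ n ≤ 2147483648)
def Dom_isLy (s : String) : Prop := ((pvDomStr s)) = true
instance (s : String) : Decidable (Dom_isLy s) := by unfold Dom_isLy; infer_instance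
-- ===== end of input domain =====

-- B drops the build-and-sort pass and checks directly that s is ≤ every proper suffix (objective: faster — no sort, no suffix list, short-circuiting scan).

-- ===== PORT A =====
def isLy (s : String) : Bool :=
  let token : List String :=
    (PySem.List.pyRange 0 (PySem.Str.len s) 1).foldl
      (fun acc i => acc ++ [PySem.Str.slice s (some i) none]) []
  let token := PySem.List.sorted token (fun x => x) false
  match PySem.List.pyGet? token 0 with
  | some t0 => if t0 = s then true else false
  | none => false   -- IndexError in Python (empty string); excluded by Pre_isLy

-- ===== PORT B =====
def isLy_alt (s : String) : Bool :=
  (PySem.List.pyRange 1 (PySem.Str.len s) 1).all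
    (fun i => decide (s ≤ PySem.Str.slice s (some i) none))

-- ===== PRECONDITION & SPEC =====
-- Pre_ excludes only the empty string, on which A's token[0] raises IndexError.
def Pre_isLy (s : String) : Prop := s ≠ ""
instance (s : String) : Decidable (Pre_isLy s) := by unfold Pre_isLy; infer_instance
def pvWitness_isLy : String := "ab"


def Spec_isLy (s : String) (out : Bool) : Prop := out = isLy_alt s
instance (s : String) (out : Bool) : Decidable (Spec_isLy s out) := by unfold Spec_isLy; infer_instance

-- ===== CLAIM (what is proved, stated in full; the proofs are below) =====
def Claim_equal_isLy : Prop := ∀ (s : String), Dom_isLy s → Pre_isLy s → Spec_isLy s (isLy s)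

-- ===== LEMMAS AND PROOFS =====

-- the loop 'token.append(s[i:])' builds the map of the suffix function over the range
lemma foldl_append_map (l : List Int) (f : Int → String) (acc : List String) :
    l.foldl (fun a i => a ++ [f i]) acc = acc ++ l.map f := by
  induction l generalizing acc with
  | nil => simp
  | cons x xs ih => simp [List.foldl, ih]

lemma suffix_zero (s : String) : PySem.Str.slice s (some 0) none = s := by
  apply String.ext
  have h : (PySem.Str.slice s (some 0) none).toList = s.toList := by
    simp [PySem.Str.toList_slice, PySem.List.slice_none_none]
  simpa [String.toList] using h

-- the head of the sorted suffix list equals s iff s is ≤ every element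
lemma head_sorted_eq_iff (L : List String) (s m : String) (t : List String)
    (hmt : PySem.List.sorted L (fun x => x) false = m :: t) (hs : s ∈ L) :
    (m = s) ↔ (∀ y ∈ L, s ≤ y) := by
  have hmin : ∀ y ∈ L, m ≤ y := fun y hy =>
    PySem.List.key_head_sorted_le L (fun x => x) hmt y hy
  have hm_mem : m ∈ L := by
    have : m ∈ PySem.List.sorted L (fun x => x) false := by rw [hmt]; simp
    exact (PySem.List.mem_sorted L (fun x => x) false m).1 this
  constructor
  · intro hms y hy
    have := hmin y hy
    rwa [hms] at this
  · intro hall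
    exact le_antisymm (hmin s hs) (hall m hm_mem)

lemma isLy_eq_alt (s : String) (hpre : s ≠ "") : isLy s = isLy_alt s := by
  have hn : 0 < (PySem.Str.len s) := by
    have h0 : s.toList ≠ [] := by
      intro h
      apply hpre
      apply String.ext
      simpa [String.toList] using h
    have : 0 < s.toList.length := List.length_pos_iff.mpr h0
    simpa [PySem.Str.len_eq] using this
  have hrange : PySem.List.pyRange 0 (PySem.Str.len s) 1
      = 0 :: PySem.List.pyRange 1 (PySem.Str.len s) 1 := by
    simpa using PySem.List.pyRange_one_cons (a := 0) (b := PySem.Str.len s) hn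
  have hs_mem : s ∈ (PySem.List.pyRange 0 (PySem.Str.len s) 1).map
      (fun i => PySem.Str.slice s (some i) none) := by
    rw [hrange]
    simp [suffix_zero]
  have htok_ne : (PySem.List.pyRange 0 (PySem.Str.len s) 1).map
      (fun i => PySem.Str.slice s (some i) none) ≠ [] := by
    rw [hrange]; simp
  obtain ⟨m, t, hmt⟩ := List.exists_cons_of_ne_nil
    (by simpa [PySem.List.sorted_eq_nil_iff] using htok_ne :
      PySem.List.sorted ((PySem.List.pyRange 0 (PySem.Str.len s) 1).map
        (fun i => PySem.Str.slice s (some i) none)) (fun x => x) false ≠ [])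
  have hkey : (m = s) ↔ (∀ i ∈ PySem.List.pyRange 1 (PySem.Str.len s) 1,
      s ≤ PySem.Str.slice s (some i) none) := by
    rw [head_sorted_eq_iff _ s m t hmt hs_mem]
    constructor
    · intro hall i hi
      exact hall _ (List.mem_map_of_mem (by rw [hrange]; exact List.mem_cons_of_mem _ hi))
    · intro hall y hy
      rcases List.mem_map.1 hy with ⟨i, hi, hfi⟩
      rw [hrange] at hi
      rcases List.mem_cons.1 hi with h0 | h1
      · subst h0; rw [← hfi, suffix_zero]
      · rw [← hfi]; exact hall i h1
  have hA : isLy s = decide (m = s) := by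
    unfold isLy
    rw [foldl_append_map]
    simp only [List.nil_append]
    rw [hmt]
    simp only [PySem.List.pyGet?, PySem.List.pyIdx?]
    by_cases h : m = s <;> simp [h]
  have hB : isLy_alt s = true ↔ (∀ i ∈ PySem.List.pyRange 1 (PySem.Str.len s) 1,
      s ≤ PySem.Str.slice s (some i) none) := by
    unfold isLy_alt
    simp only [List.all_eq_true, decide_eq_true_eq]
  rw [hA]
  by_cases h : ∀ i ∈ PySem.List.pyRange 1 (PySem.Str.len s) 1,
      s ≤ PySem.Str.slice s (some i) none
  · rw [hB.mpr h]
    simp [hkey.mpr h]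
  · have h2 : isLy_alt s = false := by
      cases hc : isLy_alt s
      · rfl
      · exact absurd (hB.mp hc) h
    rw [h2]
    simp only [decide_eq_false_iff_not]
    intro hm
    exact h (hkey.mp hm)

-- ===== VERDICT (by name: the statement is the Claim_ definition above) =====
theorem isLy_spec : Claim_equal_isLy := by
  intro s _ hpre
  unfold Spec_isLy
  exact isLy_eq_alt s hpre
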